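-- pv_equiv track=rewrite | github.com/msheby/cacm-upstart-puzzles | 2020-05/optimal_chimes.py | get_chiming_sequence
-- ===== SOURCE A (Python) =====
-- def get_chiming_sequence(n=0, b=10):
--     """
--     Given a radix *n* and a base *b*,
--     create a list containing *n* expressed in base-*b*.
--     If the least-significant digit would be zero or
--     if there would be two consecutive zeroes,
--     return None as it is not a valid chiming sequence.
--     Otherwise, return the list.
--
--     Parameters
--     ----------
--     n : int (default 0)
--         A nonnegative integer.
--     b : int (default 10)
--         A nonnegative integer radix.
--     """
--     number = int(n)
--     if number < 0:
--         raise ValueError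
--     base = int(b)
--     if base < 1:
--         raise ValueError
--     if base == 1:
--         return [1 for _ in range(number)]
--     else:
--         saw_zero = True
--         representation = []
--         while number:
--             digit = number % base
--             if digit == 0:
--                 if saw_zero:
--                     return None
--                 saw_zero = True
--             else:
--                 saw_zero = False
--             representation.append(digit)
--             number //= base
--     return representation[::-1]
-- ===== SOURCE B (Python) =====
-- def _digits(number, base):
--     """Most-significant-first base-`base` digits of `number` (empty for 0)."""
--     if number == 0:
--         return []
--     return _digits(number // base, base) + [number % base]
--
--
-- def get_chiming_sequence(n=0, b=10):
--     number = int(n)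
--     if number < 0:
--         raise ValueError
--     base = int(b)
--     if base < 1:
--         raise ValueError
--     if base == 1:
--         return [1] * number
--     ds = _digits(number, base)
--     if ds and (ds[-1] == 0 or any(x == 0 and y == 0 for x, y in zip(ds, ds[1:]))):
--         return None
--     return ds
-- ===== Notes on version B (the rewrite author's own statement) =====
-- stated objective: simpler
-- what changed: Replace A's fused while-loop that threads a saw_zero flag and appends LSD-first then reverses, by a recursive most-significant-first digit builder followed by a separate one-line validation pass (last digit zero or any adjacent zero pair).
import Mathlib
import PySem

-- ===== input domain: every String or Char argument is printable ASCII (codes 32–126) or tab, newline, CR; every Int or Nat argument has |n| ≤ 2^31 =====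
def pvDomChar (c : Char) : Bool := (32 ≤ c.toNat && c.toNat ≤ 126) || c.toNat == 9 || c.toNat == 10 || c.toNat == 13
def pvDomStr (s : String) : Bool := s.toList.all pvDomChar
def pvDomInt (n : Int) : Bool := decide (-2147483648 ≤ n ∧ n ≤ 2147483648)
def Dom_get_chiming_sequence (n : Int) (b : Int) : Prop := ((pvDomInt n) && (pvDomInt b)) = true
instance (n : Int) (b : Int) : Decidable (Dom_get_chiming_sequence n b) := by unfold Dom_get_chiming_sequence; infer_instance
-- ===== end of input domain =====

-- B replaces A's fused while-loop (saw_zero flag threaded through an LSD-first build, then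
-- reversed) by a recursive MSD-first digit builder plus a separate validation pass; objective: simpler.

-- ===== PORT A =====
-- termination helper for both digit recursions (cited by their decreasing_by)
theorem pvFloordiv_toNat_lt (number base : Int) (h0 : 0 < number) (hb : 2 ≤ base) :
    (PySem.Int.floordiv number base).toNat < number.toNat := by
  have hn : ((number.toNat : Int)) = number := Int.toNat_of_nonneg (by omega)
  have hbn : ((base.toNat : Int)) = base := Int.toNat_of_nonneg (by omega)
  rw [← hn, ← hbn, PySem.Int.floordiv_natCast]
  simp only [Int.toNat_natCast]
  exact Nat.div_lt_self (by omega) (by omega)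
-- the `while number:` loop; the guard `2 ≤ base` only makes the recursion total — A reaches
-- this loop exclusively with base ≥ 2 (base < 1 raised, base = 1 returned earlier), and
-- `0 < number` matches Python's `while number:` on the nonnegative numbers A accepts.
def pvALoop (number base : Int) (sawZero : Bool) (rep : List Int) : Option (List Int) :=
  if h : 0 < number ∧ 2 ≤ base then
    let digit := PySem.Int.mod number base
    if digit = 0 then
      if sawZero then none
      else pvALoop (PySem.Int.floordiv number base) base true (rep ++ [digit])
    else pvALoop (PySem.Int.floordiv number base) base false (rep ++ [digit])
  else some rep
termination_by number.toNat
decreasing_by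
  all_goals exact pvFloordiv_toNat_lt number base h.1 h.2

def get_chiming_sequence (n : Int) (b : Int) : Option (List Int) :=
  if n < 0 then none          -- Python: raise ValueError (excluded by Pre_)
  else if b < 1 then none     -- Python: raise ValueError (excluded by Pre_)
  else if b = 1 then some ((PySem.List.pyRange 0 n 1).map (fun _ => (1 : Int)))
  else (pvALoop n b true []).map (fun rep => rep.reverse)   -- representation[::-1]

-- ===== PORT B =====
-- _digits: MSD-first digits by recursion; guard `0 < number ∧ 2 ≤ base` only makes the
-- recursion total — B calls it with number ≥ 0 and base ≥ 2, where it is Python's `number == 0` test.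
def pvDigits (number base : Int) : List Int :=
  if h : 0 < number ∧ 2 ≤ base then
    pvDigits (PySem.Int.floordiv number base) base ++ [PySem.Int.mod number base]
  else []
termination_by number.toNat
decreasing_by
  exact pvFloordiv_toNat_lt number base h.1 h.2

def get_chiming_sequence_alt (n : Int) (b : Int) : Option (List Int) :=
  if n < 0 then none
  else if b < 1 then none
  else if b = 1 then some (List.replicate n.toNat (1 : Int))   -- [1] * number
  else
    let ds := pvDigits n b
    if ds ≠ [] ∧ (PySem.List.pyGet? ds (-1) = some 0 ∨
        (ds.zip ds.tail).any (fun p => p.1 == 0 && p.2 == 0) = true)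
    then none else some ds

-- ===== PRECONDITION & SPEC =====
-- Pre_ excludes exactly the inputs on which A raises ValueError (n < 0 or b < 1).
def Pre_get_chiming_sequence (n : Int) (b : Int) : Prop := 0 ≤ n ∧ 1 ≤ b
instance (n : Int) (b : Int) : Decidable (Pre_get_chiming_sequence n b) := by
  unfold Pre_get_chiming_sequence; infer_instance
def pvWitness_get_chiming_sequence : Int × Int := (7, 2)

def Spec_get_chiming_sequence (n : Int) (b : Int) (out : Option (List Int)) : Prop := out = get_chiming_sequence_alt n b
instance (n : Int) (b : Int) (out : Option (List Int)) : Decidable (Spec_get_chiming_sequence n b out) := by unfold Spec_get_chiming_sequence; infer_instance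

-- ===== CLAIM (what is proved, stated in full; the proofs are below) =====
def Claim_equal_get_chiming_sequence : Prop := ∀ (n : Int) (b : Int), Dom_get_chiming_sequence n b → Pre_get_chiming_sequence n b → Spec_get_chiming_sequence n b (get_chiming_sequence n b)

-- ===== LEMMAS AND PROOFS =====

theorem pvFloordiv_nonneg (number base : Int) (h0 : 0 ≤ number) (hb : 2 ≤ base) :
    0 ≤ PySem.Int.floordiv number base := by
  have hn : ((number.toNat : Int)) = number := Int.toNat_of_nonneg (by omega)
  have hbn : ((base.toNat : Int)) = base := Int.toNat_of_nonneg (by omega)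
  rw [← hn, ← hbn, PySem.Int.floordiv_natCast]
  exact Int.natCast_nonneg _

-- A's incremental saw_zero scan, as a standalone predicate on an LSD-first digit list
def pvOk (saw : Bool) (L : List Int) : Bool :=
  match L with
  | [] => true
  | d :: ds => if d = 0 then (if saw then false else pvOk true ds) else pvOk false ds

-- B's adjacency check ("no two consecutive zeros"), as a Bool
def pvNoAdj (L : List Int) : Bool := !((L.zip L.tail).any (fun p => p.1 == 0 && p.2 == 0))

theorem pvNoAdj_cons_cons (a b : Int) (u : List Int) :
    pvNoAdj (a :: b :: u) = (!(a == 0 && b == 0) && pvNoAdj (b :: u)) := by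
  simp [pvNoAdj, List.any_cons]

theorem pvOk_cons (saw : Bool) (d : Int) (ds : List Int) :
    pvOk saw (d :: ds) = if d = 0 then (if saw then false else pvOk true ds) else pvOk false ds := rfl

theorem pvOk_eq (L : List Int) :
    pvOk false L = pvNoAdj L ∧
    pvOk true L = (decide (L.head? ≠ some 0) && pvNoAdj L) := by
  induction L with
  | nil => simp [pvOk, pvNoAdj]
  | cons a t ih =>
    cases t with
    | nil =>
      by_cases ha : a = 0 <;> simp [pvOk, pvNoAdj, ha]
    | cons b u =>
      obtain ⟨ihf, iht⟩ := ih
      constructor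
      · rw [pvOk_cons, pvNoAdj_cons_cons]
        by_cases ha : a = 0
        · simp [ha, iht, beq_eq_decide]
        · simp [ha, ihf]
      · rw [pvOk_cons, pvNoAdj_cons_cons]
        by_cases ha : a = 0
        · simp [ha]
        · simp [ha, ihf]

theorem pvNoAdj_iff_chain (L : List Int) :
    pvNoAdj L = true ↔ List.IsChain (fun a b : Int => ¬(a = 0 ∧ b = 0)) L := by
  induction L with
  | nil => simp [pvNoAdj]
  | cons a t ih =>
    cases t with
    | nil => simp [pvNoAdj]
    | cons b u =>
      rw [pvNoAdj_cons_cons, List.isChain_cons_cons, ← ih]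
      constructor
      · intro h
        simp only [Bool.and_eq_true, Bool.not_eq_eq_eq_not, Bool.not_true, Bool.and_eq_false_iff] at h
        refine ⟨?_, h.2⟩
        rcases h.1 with h1 | h1 <;> simp only [beq_eq_false_iff_ne, ne_eq] at h1 <;> tauto
      · rintro ⟨h1, h2⟩
        simp only [Bool.and_eq_true, Bool.not_eq_eq_eq_not, Bool.not_true, Bool.and_eq_false_iff,
          beq_eq_false_iff_ne, ne_eq]
        exact ⟨by tauto, h2⟩

theorem pvNoAdj_reverse (L : List Int) : pvNoAdj L.reverse = pvNoAdj L := by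
  have h1 := pvNoAdj_iff_chain L.reverse
  have h2 := pvNoAdj_iff_chain L
  rw [List.isChain_reverse] at h1
  have himp : ∀ (R S : Int → Int → Prop) (M : List Int), (∀ a b, R a b → S a b) →
      List.IsChain R M → List.IsChain S M := fun R S M h hc => hc.imp h
  cases hB : pvNoAdj L with
  | false =>
    cases hR : pvNoAdj L.reverse with
    | false => rfl
    | true =>
      exfalso
      have hc := himp _ (fun a b : Int => ¬(a = 0 ∧ b = 0)) L (by tauto) (h1.mp hR)
      rw [← h2] at hc
      simp [hB] at hc
  | true =>
    exact h1.mpr (himp (fun a b : Int => ¬(a = 0 ∧ b = 0)) _ L (by tauto) (h2.mp hB))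

-- the fused A-loop equals: build the digits, then run pvOk over them (LSD-first)
theorem pvALoop_spec (k : Nat) : ∀ (number base : Int) (saw : Bool) (rep : List Int),
    number.toNat ≤ k → 0 ≤ number → 2 ≤ base →
    pvALoop number base saw rep =
      if pvOk saw (pvDigits number base).reverse
      then some (rep ++ (pvDigits number base).reverse) else none := by
  induction k with
  | zero =>
    intro number base saw rep hk h0 hb
    have hn : number = 0 := by omega
    subst hn
    rw [pvALoop, pvDigits]
    simp [pvOk]
  | succ k ih =>
    intro number base saw rep hk h0 hb
    by_cases hpos : 0 < number
    · have hguard : 0 < number ∧ 2 ≤ base := ⟨hpos, hb⟩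
      have hqnn : 0 ≤ PySem.Int.floordiv number base :=
        pvFloordiv_nonneg number base (by omega) hb
      have hqlt : (PySem.Int.floordiv number base).toNat ≤ k := by
        have := pvFloordiv_toNat_lt number base hpos hb
        omega
      rw [pvALoop, pvDigits]
      rw [dif_pos hguard, dif_pos hguard]
      simp only [List.reverse_append, List.reverse_cons, List.reverse_nil, List.nil_append,
        List.cons_append]
      by_cases hd : PySem.Int.mod number base = 0
      · rw [if_pos hd]
        cases saw with
        | true => simp [pvOk, hd]
        | false =>
          rw [ih _ _ _ _ hqlt hqnn hb]
          simp [pvOk, hd]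
      · rw [if_neg hd]
        rw [ih _ _ _ _ hqlt hqnn hb]
        simp [pvOk, hd]
    · have hn : number = 0 := by omega
      subst hn
      rw [pvALoop, pvDigits]
      simp [pvOk]

theorem pyRange_const_one (n : Int) :
    (PySem.List.pyRange 0 n 1).map (fun _ => (1 : Int)) = List.replicate n.toNat (1 : Int) := by
  rw [PySem.List.pyRange_one, List.map_map]
  simp only [Function.comp_def, List.map_const', List.length_range, Int.sub_zero]

-- ===== VERDICT (by name: the statement is the Claim_ definition above) =====
theorem get_chiming_sequence_spec : Claim_equal_get_chiming_sequence := by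
  intro n b _ hpre
  obtain ⟨hn, hb⟩ := hpre
  have h1 : ¬ n < 0 := by omega
  have h2 : ¬ b < 1 := by omega
  unfold Spec_get_chiming_sequence get_chiming_sequence get_chiming_sequence_alt
  simp only [if_neg h1, if_neg h2]
  by_cases hb1 : b = 1
  · simp only [if_pos hb1, pyRange_const_one]
  · simp only [if_neg hb1]
    have hb2 : 2 ≤ b := by omega
    rw [pvALoop_spec n.toNat n b true [] (le_refl _) hn hb2]
    have hok := (pvOk_eq (pvDigits n b).reverse).2
    rw [pvNoAdj_reverse, List.head?_reverse, ← PySem.List.pyGet?_neg_one] at hok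
    set ds := pvDigits n b with hds
    by_cases hcond : ds ≠ [] ∧ (PySem.List.pyGet? ds (-1) = some 0 ∨
        ((ds.zip ds.tail).any fun p => p.1 == 0 && p.2 == 0) = true)
    · have hfalse : pvOk true ds.reverse = false := by
        rw [hok]
        rcases hcond.2 with h | h
        · have hd : decide (PySem.List.pyGet? ds (-1) ≠ some 0) = false := by simp [h]
          rw [hd, Bool.false_and]
        · have hd : pvNoAdj ds = false := by unfold pvNoAdj; rw [h]; rfl
          rw [hd, Bool.and_false]
      rw [hfalse, if_pos hcond]
      simp
    · have htrue : pvOk true ds.reverse = true := by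
        rw [hok]
        rw [not_and_or, not_or] at hcond
        rcases hcond with hnil | ⟨hA, hB⟩
        · rw [not_not] at hnil
          simp [hnil, pvNoAdj, PySem.List.pyGet?_neg_one]
        · simp only [Bool.not_eq_true] at hB
          simp [pvNoAdj, hA, hB]
      rw [htrue, if_neg hcond]
      simp
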